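-- pv_equiv track=rewrite | github.com/Hallyson34/uPython2 | 2808_mais_cavalos.py | verificaTabuleiro
-- ===== SOURCE A (Python) =====
-- def verificaTabuleiro(i,f):
--     mi = int(i[1])-1
--     ni = ord(i[0])-97
--     mf = int(f[1])-1
--     nf = ord(f[0])-97
--     for i in range(1,3):
--         if mf == mi+1:
--             if nf == ni+2 or nf == ni-2:
--                 return True
--             else:
--                 return False
--         elif mf == mi+2:
--             if nf == ni+1 or nf == ni-1:
--                 return True
--             else:
--                 return False
--         elif mf == mi-1:
--             if nf == ni+2 or nf == ni-2:
--                 return True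
--             else:
--                 return False
--         elif mf == mi-2:
--             if nf == ni+1 or nf == ni-1:
--                 return True
--             else:
--                 return False
--         else:
--             return False
-- ===== SOURCE B (Python) =====
-- def verificaTabuleiro(i, f):
--     mi = int(i[1])-1
--     ni = ord(i[0])-97
--     mf = int(f[1])-1
--     nf = ord(f[0])-97
--     # A knight move is exactly a displacement of squared Euclidean length 5.
--     return (mf - mi)**2 + (nf - ni)**2 == 5
-- ===== Notes on version B (the rewrite author's own statement) =====
-- stated objective: simpler
-- what changed: Replaces the dead for-loop and the 4-branch if/elif cascade with a single arithmetic test: the squared Euclidean length of the displacement equals 5, which over the integers characterises exactly the eight knight offsets.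
import Mathlib
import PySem

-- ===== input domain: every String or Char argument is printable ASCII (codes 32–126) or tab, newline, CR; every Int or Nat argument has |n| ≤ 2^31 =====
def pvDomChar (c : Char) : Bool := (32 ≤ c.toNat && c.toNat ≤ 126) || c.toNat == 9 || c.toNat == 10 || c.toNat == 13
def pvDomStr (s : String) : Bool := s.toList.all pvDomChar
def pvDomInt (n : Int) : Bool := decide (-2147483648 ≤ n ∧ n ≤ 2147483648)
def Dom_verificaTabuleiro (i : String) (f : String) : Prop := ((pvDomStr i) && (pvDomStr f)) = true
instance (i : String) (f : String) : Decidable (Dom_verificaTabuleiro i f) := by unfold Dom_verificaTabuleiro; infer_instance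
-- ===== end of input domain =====

-- B replaces A's dead for-loop and 4-branch if/elif cascade by one arithmetic test,
-- squared displacement length == 5 (objective: simpler); parsing is identical.

-- ===== PORT A =====
-- The for-loop 'for i in range(1,3)' always returns in its first iteration
-- (every branch of the cascade returns), so its body is transliterated once.
def verificaTabuleiro (i : String) (f : String) : Bool :=
  match PySem.Str.pyGet? i 1, PySem.Str.pyGet? i 0,
        PySem.Str.pyGet? f 1, PySem.Str.pyGet? f 0 with
  | some ci1, some ci0, some cf1, some cf0 =>
    match PySem.Int.ofChars? [ci1], PySem.Int.ofChars? [cf1] with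
    | some vi, some vf =>
      let mi : Int := vi - 1
      let ni : Int := (ci0.toNat : Int) - 97
      let mf : Int := vf - 1
      let nf : Int := (cf0.toNat : Int) - 97
      if mf == mi + 1 then (nf == ni + 2 || nf == ni - 2)
      else if mf == mi + 2 then (nf == ni + 1 || nf == ni - 1)
      else if mf == mi - 1 then (nf == ni + 2 || nf == ni - 2)
      else if mf == mi - 2 then (nf == ni + 1 || nf == ni - 1)
      else false
    | _, _ => false      -- int() ValueError: excluded by Pre_
  | _, _, _, _ => false  -- IndexError: excluded by Pre_

-- ===== PORT B =====
def verificaTabuleiro_alt (i : String) (f : String) : Bool :=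
  ((((PySem.Str.pyGet? i 1).bind (fun c => PySem.Int.ofChars? [c])).bind (fun vi =>
    (PySem.Str.pyGet? i 0).bind (fun ci0 =>
      (((PySem.Str.pyGet? f 1).bind (fun c => PySem.Int.ofChars? [c])).bind (fun vf =>
        (PySem.Str.pyGet? f 0).map (fun cf0 =>
          let mi : Int := vi - 1
          let ni : Int := (ci0.toNat : Int) - 97
          let mf : Int := vf - 1
          let nf : Int := (cf0.toNat : Int) - 97
          ((mf - mi) * (mf - mi) + (nf - ni) * (nf - ni) == 5)))))))).getD false
      -- none (IndexError / int() ValueError): excluded by Pre_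

-- ===== PRECONDITION & SPEC =====
-- Pre_ excludes exactly the inputs on which Python A raises: strings shorter
-- than 2 (IndexError on i[1]/f[1]) or whose second character is not a decimal
-- digit (ValueError from int()).
def Pre_verificaTabuleiro (i : String) (f : String) : Prop :=
  (i.toList[1]?.elim false Char.isDigit) = true ∧
  (f.toList[1]?.elim false Char.isDigit) = true
instance (i : String) (f : String) : Decidable (Pre_verificaTabuleiro i f) := by
  unfold Pre_verificaTabuleiro; infer_instance
def pvWitness_verificaTabuleiro : String × String := ("a1", "b3")

def Spec_verificaTabuleiro (i : String) (f : String) (out : Bool) : Prop := out = verificaTabuleiro_alt i f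
instance (i : String) (f : String) (out : Bool) : Decidable (Spec_verificaTabuleiro i f out) := by unfold Spec_verificaTabuleiro; infer_instance

-- ===== CLAIM (what is proved, stated in full; the proofs are below) =====
def Claim_equal_verificaTabuleiro : Prop := ∀ (i : String) (f : String), Dom_verificaTabuleiro i f → Pre_verificaTabuleiro i f → Spec_verificaTabuleiro i f (verificaTabuleiro i f)

-- ===== LEMMAS AND PROOFS =====

-- Over the integers a² + b² = 5 exactly at the eight knight offsets.
theorem knight_sq (a b : Int) :
    (a * a + b * b = 5) ↔
      ((a = 1 ∨ a = -1) ∧ (b = 2 ∨ b = -2)) ∨ ((a = 2 ∨ a = -2) ∧ (b = 1 ∨ b = -1)) := by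
  constructor
  · intro h
    have ha1 : -2 ≤ a := by nlinarith
    have ha2 : a ≤ 2 := by nlinarith
    have hb1 : -2 ≤ b := by nlinarith
    have hb2 : b ≤ 2 := by nlinarith
    interval_cases a <;> interval_cases b <;> norm_num at h <;> norm_num
  · rintro (⟨(rfl | rfl), (rfl | rfl)⟩ | ⟨(rfl | rfl), (rfl | rfl)⟩) <;> norm_num

-- The branch cascade of A computes exactly B's squared-length-5 predicate.
theorem cascade_eq_sq (mi ni mf nf : Int) :
    (if mf == mi + 1 then (nf == ni + 2 || nf == ni - 2)
     else if mf == mi + 2 then (nf == ni + 1 || nf == ni - 1)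
     else if mf == mi - 1 then (nf == ni + 2 || nf == ni - 2)
     else if mf == mi - 2 then (nf == ni + 1 || nf == ni - 1)
     else false)
    = ((mf - mi) * (mf - mi) + (nf - ni) * (nf - ni) == 5) := by
  rw [Bool.eq_iff_iff]
  simp only [beq_iff_eq]
  rw [knight_sq]
  split_ifs with h1 h2 h3 h4 <;> simp only [Bool.or_eq_true, beq_iff_eq, false_iff] <;> omega

-- The two ports agree on every input (where Python A raises, both ports
-- return the same fallback, so the unconditional equality holds).
theorem verificaTabuleiro_eq_alt (i f : String) :
    verificaTabuleiro i f = verificaTabuleiro_alt i f := by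
  unfold verificaTabuleiro verificaTabuleiro_alt
  cases PySem.Str.pyGet? i 1 with
  | none => rfl
  | some ci1 =>
    dsimp only [Option.bind, Option.map, Option.getD]
    cases PySem.Str.pyGet? i 0 with
    | none => cases PySem.Int.ofChars? [ci1] <;> rfl
    | some ci0 =>
      cases PySem.Str.pyGet? f 1 with
      | none => cases PySem.Int.ofChars? [ci1] <;> rfl
      | some cf1 =>
        cases PySem.Str.pyGet? f 0 with
        | none =>
          cases PySem.Int.ofChars? [ci1] <;>
            first
              | rfl
              | (dsimp only [Option.bind, Option.map, Option.getD]
                 cases PySem.Int.ofChars? [cf1] <;> rfl)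
        | some cf0 =>
          dsimp only [Option.bind, Option.map, Option.getD]
          cases PySem.Int.ofChars? [ci1] with
          | none => cases PySem.Int.ofChars? [cf1] <;> rfl
          | some vi =>
            dsimp only [Option.bind, Option.map, Option.getD]
            cases PySem.Int.ofChars? [cf1] with
            | none => rfl
            | some vf =>
              dsimp only [Option.bind, Option.map, Option.getD]
              exact cascade_eq_sq _ _ _ _

-- ===== VERDICT (by name: the statement is the Claim_ definition above) =====
theorem verificaTabuleiro_spec : Claim_equal_verificaTabuleiro := by
  intro i f _ _
  unfold Spec_verificaTabuleiro
  exact verificaTabuleiro_eq_alt i f
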